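-- pv_equiv track=rewrite | github.com/Avaren/adventofcode2018 | 6.py | draw_region_map
-- ===== SOURCE A (Python) =====
-- import itertools
-- from string import ascii_lowercase, ascii_uppercase
--
-- def draw_region_map(points, bounds, regions):
--     m = []
--     point_key = dict(zip(points, itertools.chain.from_iterable(itertools.repeat(ascii_uppercase))))
--     for j in range(bounds[1], bounds[3] + 1):
--         r = []
--         for i in range(bounds[0], bounds[2] + 1):
--             if (i, j) in point_key:
--                 char = point_key[(i, j)].upper()
--             elif (i, j) in regions:
--                 char = '#'
--             else:
--                 char = '.'
--             r.append(char)
--         m.append(''.join(r))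
--     return '\n'.join(m)
-- ===== SOURCE B (Python) =====
-- from string import ascii_uppercase
--
-- def draw_region_map(points, bounds, regions):
--     x0, y0, x1, y1 = bounds
--     w = x1 - x0 + 1
--     h = y1 - y0 + 1
--     grid = [['.'] * w for _ in range(h)]
--     for i, j in regions:
--         if x0 <= i <= x1 and y0 <= j <= y1:
--             grid[j - y0][i - x0] = '#'
--     for idx, (i, j) in enumerate(points):
--         if x0 <= i <= x1 and y0 <= j <= y1:
--             grid[j - y0][i - x0] = ascii_uppercase[idx % 26]
--     return '\n'.join(''.join(row) for row in grid)
-- ===== Notes on version B (the rewrite author's own statement) =====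
-- stated objective: alternative
-- what changed: Instead of computing each grid cell by membership tests against the point dictionary and the region set, B allocates the '.'-filled grid once and paints '#' for in-bounds regions and then cyclic A-Z labels for in-bounds points directly into it (points painted last, later duplicates overwriting), then joins the rows.
import Mathlib
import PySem

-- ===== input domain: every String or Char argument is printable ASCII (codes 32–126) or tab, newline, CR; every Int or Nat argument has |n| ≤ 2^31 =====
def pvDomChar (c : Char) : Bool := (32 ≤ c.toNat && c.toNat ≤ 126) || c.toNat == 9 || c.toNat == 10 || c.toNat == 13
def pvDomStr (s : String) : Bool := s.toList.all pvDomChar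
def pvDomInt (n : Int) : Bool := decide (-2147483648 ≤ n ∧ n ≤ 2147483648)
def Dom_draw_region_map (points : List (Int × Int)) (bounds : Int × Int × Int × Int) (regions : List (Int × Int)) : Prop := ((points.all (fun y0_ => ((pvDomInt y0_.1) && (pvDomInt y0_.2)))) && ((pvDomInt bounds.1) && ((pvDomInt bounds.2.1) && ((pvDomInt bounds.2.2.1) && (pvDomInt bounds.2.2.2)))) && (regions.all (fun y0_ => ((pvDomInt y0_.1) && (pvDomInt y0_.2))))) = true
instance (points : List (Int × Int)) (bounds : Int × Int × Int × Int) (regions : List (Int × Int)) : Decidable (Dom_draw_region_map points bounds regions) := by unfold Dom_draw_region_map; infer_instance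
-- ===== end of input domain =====

-- B builds the grid once and paints regions, then labelled points, into it (a 'paint' decomposition)
-- instead of A's per-cell dict/set membership tests; objective: alternative decomposition, same cost.

-- ===== PORT A =====
-- string.ascii_uppercase
def pvAZ : List Char :=
  ['A','B','C','D','E','F','G','H','I','J','K','L','M','N','O','P','Q','R','S','T','U','V','W','X','Y','Z']

-- the letter zipped with the k-th point by zip(points, chain.from_iterable(repeat(ascii_uppercase)))
def pvLetter (k : Int) : Char := pvAZ.getD (k % 26).toNat 'A'

-- point_key = dict(zip(points, <cycled uppercase letters>)); a later duplicate point overwrites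
def pvPointKey (points : List (Int × Int)) : PySem.Dict (Int × Int) Char :=
  (PySem.List.enumerate points).foldl (fun d kp => d.insert kp.2 (pvLetter kp.1)) PySem.Dict.empty

def draw_region_map (points : List (Int × Int)) (bounds : Int × Int × Int × Int) (regions : List (Int × Int)) : String :=
  let point_key := pvPointKey points
  let m := (PySem.List.pyRange bounds.2.1 (bounds.2.2.2 + 1) 1).map (fun j =>
    String.mk ((PySem.List.pyRange bounds.1 (bounds.2.2.1 + 1) 1).map (fun i =>
      match point_key.get? (i, j) with
      | some c => PySem.Chars.upperChar c
      | none => if (i, j) ∈ regions then '#' else '.')))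
  PySem.Str.join "\n" m

-- ===== PORT B =====
-- x0 <= i <= x1 and y0 <= j <= y1
def pvInB (x0 y0 x1 y1 : Int) (p : Int × Int) : Bool :=
  decide (x0 ≤ p.1 ∧ p.1 ≤ x1 ∧ y0 ≤ p.2 ∧ p.2 ≤ y1)

-- grid[r][c] = ch
def pvSetCell (g : List (List Char)) (r c : Nat) (ch : Char) : List (List Char) :=
  g.modify r (fun row => row.set c ch)

def draw_region_map_alt (points : List (Int × Int)) (bounds : Int × Int × Int × Int) (regions : List (Int × Int)) : String :=
  let x0 := bounds.1
  let y0 := bounds.2.1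
  let x1 := bounds.2.2.1
  let y1 := bounds.2.2.2
  let grid0 := List.replicate (y1 - y0 + 1).toNat (List.replicate (x1 - x0 + 1).toNat '.')
  let grid1 := regions.foldl (fun g p =>
    if pvInB x0 y0 x1 y1 p then pvSetCell g (p.2 - y0).toNat (p.1 - x0).toNat '#' else g) grid0
  let grid2 := (PySem.List.enumerate points).foldl (fun g kp =>
    if pvInB x0 y0 x1 y1 kp.2 then pvSetCell g (kp.2.2 - y0).toNat (kp.2.1 - x0).toNat (pvLetter kp.1) else g) grid1
  PySem.Str.join "\n" (grid2.map String.mk)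

-- ===== PRECONDITION & SPEC =====
def Spec_draw_region_map (points : List (Int × Int)) (bounds : Int × Int × Int × Int) (regions : List (Int × Int)) (out : String) : Prop := out = draw_region_map_alt points bounds regions
instance (points : List (Int × Int)) (bounds : Int × Int × Int × Int) (regions : List (Int × Int)) (out : String) : Decidable (Spec_draw_region_map points bounds regions out) := by unfold Spec_draw_region_map; infer_instance

-- ===== CLAIM (what is proved, stated in full; the proofs are below) =====
def Claim_equal_draw_region_map : Prop := ∀ (points : List (Int × Int)) (bounds : Int × Int × Int × Int) (regions : List (Int × Int)), Dom_draw_region_map points bounds regions → Spec_draw_region_map points bounds regions (draw_region_map points bounds regions)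

-- ===== LEMMAS AND PROOFS =====

-- the character A's inner loop chooses for cell (i, j), given a point dictionary d
def pvCellOf (regions : List (Int × Int)) (d : PySem.Dict (Int × Int) Char) (i j : Int) : Char :=
  match d.get? (i, j) with
  | some c => PySem.Chars.upperChar c
  | none => if (i, j) ∈ regions then '#' else '.'

def pvShape (w h : Nat) (g : List (List Char)) : Prop :=
  g.length = h ∧ ∀ (r : Nat) (_ : r < g.length), g[r].length = w

def pvGet (g : List (List Char)) (r c : Nat) : Char := (g.getD r []).getD c ' '

lemma pvUpper_letter (k : Int) : PySem.Chars.upperChar (pvLetter k) = pvLetter k := by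
  unfold pvLetter
  exact (by decide :
    ∀ n : Nat, n < 26 → PySem.Chars.upperChar (pvAZ.getD n 'A') = pvAZ.getD n 'A') _ (by omega)

lemma pvShape_setCell {w h : Nat} {g : List (List Char)} (hs : pvShape w h g)
    (r c : Nat) (ch : Char) : pvShape w h (pvSetCell g r c ch) := by
  obtain ⟨hlen, hrow⟩ := hs
  constructor
  · simpa [pvSetCell, List.length_modify] using hlen
  · intro r' hr'
    simp only [pvSetCell, List.length_modify] at hr'
    simp only [pvSetCell]
    rw [List.getElem_modify]
    split
    · simpa [List.length_set] using hrow r' hr'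
    · exact hrow r' hr'

lemma pvShape_getD {w h : Nat} {g : List (List Char)} (hs : pvShape w h g)
    {r : Nat} (hr : r < h) : (g.getD r []).length = w := by
  obtain ⟨hlen, hrow⟩ := hs
  have hrl : r < g.length := by omega
  rw [List.getD_eq_getElem _ _ hrl]
  exact hrow r hrl

lemma pvGet_eq_getElem {g : List (List Char)} {r c : Nat} (hr : r < g.length)
    (hc : c < g[r].length) : pvGet g r c = g[r][c] := by
  unfold pvGet
  rw [List.getD_eq_getElem _ _ hr, List.getD_eq_getElem _ _ hc]

lemma pvGet_setCell {g : List (List Char)} {r c : Nat} (hr : r < g.length)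
    (hc : c < (g.getD r []).length) (ch : Char) (r' c' : Nat) :
    pvGet (pvSetCell g r c ch) r' c' = if r' = r ∧ c' = c then ch else pvGet g r' c' := by
  unfold pvGet pvSetCell
  by_cases hrr : r' = r
  · subst hrr
    have h1 : (g.modify r' fun row => row.set c ch).getD r' [] = (g.getD r' []).set c ch := by
      rw [List.getD_eq_getElem?_getD, List.getD_eq_getElem?_getD, List.getElem?_modify,
        List.getElem?_eq_getElem hr]
      simp
    rw [h1]
    by_cases hcc : c' = c
    · rw [hcc]
      have hcq : c < (g[r']?.getD []).length := by
        rw [← List.getD_eq_getElem?_getD]; exact hc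
      simp [List.getD_eq_getElem?_getD, List.getElem?_set, hcq]
    · have hne : ¬ c = c' := fun he => hcc he.symm
      simp [List.getD_eq_getElem?_getD, List.getElem?_set, hne, hcc]
  · have hne : ¬ r = r' := fun he => hrr he.symm
    have h1 : (g.modify r fun row => row.set c ch).getD r' [] = g.getD r' [] := by
      rw [List.getD_eq_getElem?_getD, List.getD_eq_getElem?_getD, List.getElem?_modify]
      cases g[r']? <;> simp [hne]
    rw [h1]
    simp [hrr]

lemma pvCellOf_insert (regions : List (Int × Int)) (d : PySem.Dict (Int × Int) Char)
    (q : Int × Int) (v : Char) (i j : Int) :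
    pvCellOf regions (d.insert q v) i j
      = if (i, j) = q then PySem.Chars.upperChar v else pvCellOf regions d i j := by
  by_cases hq : (i, j) = q
  · simp [pvCellOf, PySem.Dict.get?_insert, hq]
  · simp only [pvCellOf, PySem.Dict.get?_insert, if_neg hq]

-- one conditional paint step changes exactly the (in-box) cell it addresses
lemma pvStep_get (x0 y0 x1 y1 : Int) (w h : Nat)
    (hw : w = (x1 - x0 + 1).toNat) (hh : h = (y1 - y0 + 1).toNat)
    {g : List (List Char)} (hs : pvShape w h g) (p1 p2 : Int) (ch : Char) (r c : Nat)
    (hr : r < h) (hc : c < w) :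
    pvGet (if pvInB x0 y0 x1 y1 (p1, p2) then pvSetCell g (p2 - y0).toNat (p1 - x0).toNat ch else g) r c
      = if (x0 + (c : Int), y0 + (r : Int)) = (p1, p2) then ch else pvGet g r c := by
  have hgl : g.length = h := hs.1
  by_cases hpc : (x0 + (c : Int), y0 + (r : Int)) = (p1, p2)
  · have e1 : x0 + (c : Int) = p1 := congrArg Prod.fst hpc
    have e2 : y0 + (r : Int) = p2 := congrArg Prod.snd hpc
    have hin : pvInB x0 y0 x1 y1 (p1, p2) = true := by
      unfold pvInB
      exact decide_eq_true ⟨by omega, by omega, by omega, by omega⟩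
    have er : (p2 - y0).toNat = r := by omega
    have ec : (p1 - x0).toNat = c := by omega
    rw [if_pos hin, er, ec,
      pvGet_setCell (by omega) (by rw [pvShape_getD hs hr]; omega) ch r c]
    simp [hpc]
  · rw [if_neg hpc]
    by_cases hguard : pvInB x0 y0 x1 y1 (p1, p2) = true
    · obtain ⟨hb1, hb2, hb3, hb4⟩ : x0 ≤ p1 ∧ p1 ≤ x1 ∧ y0 ≤ p2 ∧ p2 ≤ y1 := by
        have hb := hguard
        unfold pvInB at hb
        exact of_decide_eq_true hb
      have hr0 : (p2 - y0).toNat < h := by omega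
      rw [if_pos hguard,
        pvGet_setCell (by omega) (by rw [pvShape_getD hs hr0]; omega) ch r c,
        if_neg (fun hand => hpc (by
          obtain ⟨ha, hb⟩ := hand
          rw [Prod.mk.injEq]
          exact ⟨by omega, by omega⟩))]
    · rw [if_neg hguard]

lemma pvPaintRegions (x0 y0 x1 y1 : Int) (w h : Nat)
    (hw : w = (x1 - x0 + 1).toNat) (hh : h = (y1 - y0 + 1).toNat) :
    ∀ (rs : List (Int × Int)) (g : List (List Char)), pvShape w h g →
      pvShape w h (rs.foldl (fun g p => if pvInB x0 y0 x1 y1 p then pvSetCell g (p.2 - y0).toNat (p.1 - x0).toNat '#' else g) g)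
      ∧ ∀ (r c : Nat), r < h → c < w →
        pvGet (rs.foldl (fun g p => if pvInB x0 y0 x1 y1 p then pvSetCell g (p.2 - y0).toNat (p.1 - x0).toNat '#' else g) g) r c
          = if (x0 + (c : Int), y0 + (r : Int)) ∈ rs then '#' else pvGet g r c := by
  intro rs
  induction rs with
  | nil => intro g hs; exact ⟨hs, fun r c _ _ => by simp⟩
  | cons p rest ih =>
    intro g hs
    obtain ⟨p1, p2⟩ := p
    have hs' : pvShape w h (if pvInB x0 y0 x1 y1 (p1, p2) then pvSetCell g (p2 - y0).toNat (p1 - x0).toNat '#' else g) := by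
      split
      · exact pvShape_setCell hs _ _ _
      · exact hs
    obtain ⟨ihs, ihget⟩ := ih _ hs'
    constructor
    · rw [List.foldl_cons]; dsimp only; exact ihs
    · intro r c hr hc
      rw [List.foldl_cons]; dsimp only
      rw [ihget r c hr hc, pvStep_get x0 y0 x1 y1 w h hw hh hs p1 p2 '#' r c hr hc]
      simp only [List.mem_cons]
      by_cases h1 : (x0 + (c : Int), y0 + (r : Int)) ∈ rest
      · simp [h1]
      · by_cases h2 : (x0 + (c : Int), y0 + (r : Int)) = (p1, p2)
        · simp [h1, h2]
        · simp [h1, h2]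

lemma pvPaintPoints (x0 y0 x1 y1 : Int) (w h : Nat) (regions : List (Int × Int))
    (hw : w = (x1 - x0 + 1).toNat) (hh : h = (y1 - y0 + 1).toNat) :
    ∀ (eps : List (Int × (Int × Int))) (d : PySem.Dict (Int × Int) Char) (g : List (List Char)),
      pvShape w h g →
      (∀ (r c : Nat), r < h → c < w → pvGet g r c = pvCellOf regions d (x0 + (c : Int)) (y0 + (r : Int))) →
      pvShape w h (eps.foldl (fun g kp => if pvInB x0 y0 x1 y1 kp.2 then pvSetCell g (kp.2.2 - y0).toNat (kp.2.1 - x0).toNat (pvLetter kp.1) else g) g)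
      ∧ ∀ (r c : Nat), r < h → c < w →
        pvGet (eps.foldl (fun g kp => if pvInB x0 y0 x1 y1 kp.2 then pvSetCell g (kp.2.2 - y0).toNat (kp.2.1 - x0).toNat (pvLetter kp.1) else g) g) r c
          = pvCellOf regions (eps.foldl (fun d kp => d.insert kp.2 (pvLetter kp.1)) d) (x0 + (c : Int)) (y0 + (r : Int)) := by
  intro eps
  induction eps with
  | nil => intro d g hs hg; exact ⟨hs, hg⟩
  | cons kp rest ih =>
    intro d g hs hg
    obtain ⟨k, p1, p2⟩ := kp
    have hs' : pvShape w h (if pvInB x0 y0 x1 y1 (p1, p2) then pvSetCell g (p2 - y0).toNat (p1 - x0).toNat (pvLetter k) else g) := by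
      split
      · exact pvShape_setCell hs _ _ _
      · exact hs
    have hg' : ∀ (r c : Nat), r < h → c < w →
        pvGet (if pvInB x0 y0 x1 y1 (p1, p2) then pvSetCell g (p2 - y0).toNat (p1 - x0).toNat (pvLetter k) else g) r c
          = pvCellOf regions (d.insert (p1, p2) (pvLetter k)) (x0 + (c : Int)) (y0 + (r : Int)) := by
      intro r c hr hc
      rw [pvStep_get x0 y0 x1 y1 w h hw hh hs p1 p2 (pvLetter k) r c hr hc,
        pvCellOf_insert, pvUpper_letter]
      by_cases hpc : (x0 + (c : Int), y0 + (r : Int)) = (p1, p2)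
      · simp [hpc]
      · simp [hpc, hg r c hr hc]
    obtain ⟨ihs, ihget⟩ := ih _ _ hs' hg'
    constructor
    · rw [List.foldl_cons]; dsimp only; exact ihs
    · intro r c hr hc
      rw [List.foldl_cons, List.foldl_cons]; dsimp only
      exact ihget r c hr hc

-- assembling the grid into A's row strings, given the cell characterization
lemma pvAssemble (x0 y0 x1 y1 : Int) (regions : List (Int × Int))
    (pk : PySem.Dict (Int × Int) Char) (G : List (List Char))
    (hs : pvShape (x1 - x0 + 1).toNat (y1 - y0 + 1).toNat G)
    (hg : ∀ (r c : Nat), r < (y1 - y0 + 1).toNat → c < (x1 - x0 + 1).toNat →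
      pvGet G r c = pvCellOf regions pk (x0 + (c : Int)) (y0 + (r : Int))) :
    (PySem.List.pyRange y0 (y1 + 1) 1).map (fun j =>
      String.mk ((PySem.List.pyRange x0 (x1 + 1) 1).map (fun i =>
        match pk.get? (i, j) with
        | some c => PySem.Chars.upperChar c
        | none => if (i, j) ∈ regions then '#' else '.')))
      = G.map String.mk := by
  apply List.ext_getElem
  · rw [List.length_map, List.length_map, PySem.List.length_pyRange_one, hs.1]
    omega
  · intro r h1 h2
    have hr : r < (y1 - y0 + 1).toNat := by rw [List.length_map, hs.1] at h2; exact h2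
    have hrG : r < G.length := by rw [hs.1]; exact hr
    rw [List.getElem_map, List.getElem_map, PySem.List.getElem_pyRange_one]
    refine congrArg String.mk ?_
    apply List.ext_getElem
    · rw [List.length_map, PySem.List.length_pyRange_one, hs.2 r hrG]
      omega
    · intro c hc1 hc2
      have hcw : c < (x1 - x0 + 1).toNat := by rw [hs.2 r hrG] at hc2; exact hc2
      rw [List.getElem_map, PySem.List.getElem_pyRange_one,
        ← pvGet_eq_getElem (c := c) hrG (by rw [hs.2 r hrG]; exact hcw), hg r c hr hcw]
      rfl

-- ===== VERDICT (by name: the statement is the Claim_ definition above) =====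
theorem draw_region_map_spec : Claim_equal_draw_region_map := by
  unfold Claim_equal_draw_region_map
  intro points bounds regions _
  unfold Spec_draw_region_map draw_region_map draw_region_map_alt pvPointKey
  obtain ⟨x0, y0, x1, y1⟩ := bounds
  dsimp only
  refine congrArg (PySem.Str.join "\n") ?_
  have hshape0 : pvShape (x1 - x0 + 1).toNat (y1 - y0 + 1).toNat
      (List.replicate (y1 - y0 + 1).toNat (List.replicate (x1 - x0 + 1).toNat '.')) := by
    refine ⟨List.length_replicate, ?_⟩
    intro r hr
    rw [List.getElem_replicate]
    exact List.length_replicate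
  have hget0 : ∀ (r c : Nat), r < (y1 - y0 + 1).toNat → c < (x1 - x0 + 1).toNat →
      pvGet (List.replicate (y1 - y0 + 1).toNat (List.replicate (x1 - x0 + 1).toNat '.')) r c = '.' := by
    intro r c hr hc
    unfold pvGet
    rw [List.getD_eq_getElem (List.replicate (y1 - y0 + 1).toNat (List.replicate (x1 - x0 + 1).toNat '.'))
        [] (by simpa using hr), List.getElem_replicate,
      List.getD_eq_getElem _ _ (by simpa using hc), List.getElem_replicate]
  obtain ⟨hs1, hg1⟩ := pvPaintRegions x0 y0 x1 y1 _ _ rfl rfl regions _ hshape0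
  have hinit : ∀ (r c : Nat), r < (y1 - y0 + 1).toNat → c < (x1 - x0 + 1).toNat →
      pvGet (regions.foldl (fun g p => if pvInB x0 y0 x1 y1 p then pvSetCell g (p.2 - y0).toNat (p.1 - x0).toNat '#' else g)
        (List.replicate (y1 - y0 + 1).toNat (List.replicate (x1 - x0 + 1).toNat '.'))) r c
        = pvCellOf regions PySem.Dict.empty (x0 + (c : Int)) (y0 + (r : Int)) := by
    intro r c hr hc
    rw [hg1 r c hr hc, hget0 r c hr hc]
    simp only [pvCellOf, PySem.Dict.get?_empty]
  obtain ⟨hs2, hg2⟩ := pvPaintPoints x0 y0 x1 y1 _ _ regions rfl rfl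
    (PySem.List.enumerate points) PySem.Dict.empty _ hs1 hinit
  exact pvAssemble x0 y0 x1 y1 regions _ _ hs2 hg2
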